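-- pv_equiv track=rewrite | github.com/ash2510/Deep-Learn-Oil | recurrent/char/process_text.py | make_target
-- ===== SOURCE A (Python) =====
-- def make_target(text, n_seq, n_steps):
--     arr, inner = [], []
--     nsteps = 0
--     for char in text:
--         inner.append(ord(char))
--         nsteps += 1
--         if (nsteps >= n_steps):
--             arr.append(inner)
--             if (len(arr) >= n_seq):
--                 break
--             inner = []
--             nsteps = 0
--     return arr
-- ===== SOURCE B (Python) =====
-- def make_target(text, n_seq, n_steps):
--     codes = [ord(c) for c in text]
--     count = min(n_seq, len(codes) // n_steps)
--     return [codes[i * n_steps : (i + 1) * n_steps] for i in range(count)]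
-- ===== Notes on version B (the rewrite author's own statement) =====
-- stated objective: simpler
-- what changed: Replaces A's single stateful loop (growing inner buffer, step counter, break) by a closed-form chunk count min(n_seq, len(text)//n_steps) and a slice comprehension; Pre_ excludes n_steps <= 0, where B's floor division raises (n_steps = 0) or the chunk size is meaningless and A's size-1 chunks are accidental.
-- intended difference: For n_seq <= 0 with a text holding at least one full chunk (1 <= n_steps <= len(text)), A returns one chunk because it appends before testing n_seq, while B returns [], the intended result of requesting a non-positive number of sequences. — e.g. on make_target("ab", 0, 1): A returns [[97]], B returns []
-- outside the precondition, e.g. on make_target('ab', 2, 0): A returns [[97], [98]], B raises ZeroDivisionError; on make_target('ab', 2, -1): A returns [[97], [98]], B returns []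
import Mathlib
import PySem

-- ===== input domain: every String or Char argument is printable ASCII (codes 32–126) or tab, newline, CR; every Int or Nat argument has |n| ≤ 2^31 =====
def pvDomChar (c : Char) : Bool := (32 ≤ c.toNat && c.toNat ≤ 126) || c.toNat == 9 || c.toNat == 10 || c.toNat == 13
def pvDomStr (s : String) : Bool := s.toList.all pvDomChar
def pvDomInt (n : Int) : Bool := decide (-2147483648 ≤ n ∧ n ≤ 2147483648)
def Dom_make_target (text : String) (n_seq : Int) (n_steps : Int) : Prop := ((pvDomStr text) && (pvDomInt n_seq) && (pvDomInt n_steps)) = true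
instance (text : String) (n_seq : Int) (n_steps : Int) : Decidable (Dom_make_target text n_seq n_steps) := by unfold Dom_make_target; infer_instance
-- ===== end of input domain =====

-- B replaces A's stateful accumulate-and-break loop by a closed-form chunk count and a
-- slice comprehension (objective: simpler; same cost). Return-value equivalence only.

-- ===== PORT A =====
-- A's for-loop with its mutable state (arr, inner, nsteps) and the break on len(arr) >= n_seq.
def make_target_loop (n_seq : Int) (n_steps : Int) :
    List Char → List (List Int) → List Int → Int → List (List Int)
  | [], arr, _, _ => arr
  | c :: cs, arr, inner, nsteps =>
    let inner' := inner ++ [(c.toNat : Int)]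
    let nsteps' := nsteps + 1
    if n_steps ≤ nsteps' then
      let arr' := arr ++ [inner']
      if n_seq ≤ (arr'.length : Int) then arr'
      else make_target_loop n_seq n_steps cs arr' [] 0
    else make_target_loop n_seq n_steps cs arr inner' nsteps'

def make_target (text : String) (n_seq : Int) (n_steps : Int) : List (List Int) :=
  make_target_loop n_seq n_steps text.toList [] [] 0

-- ===== PORT B =====
def make_target_alt (text : String) (n_seq : Int) (n_steps : Int) : List (List Int) :=
  let codes := text.toList.map (fun c => (c.toNat : Int))
  let count := min n_seq (PySem.Int.floordiv (codes.length : Int) n_steps)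
  (PySem.List.pyRange 0 count 1).map
    (fun i => PySem.List.slice codes (some (i * n_steps)) (some ((i + 1) * n_steps)))

-- ===== PRECONDITION & SPEC =====
-- Pre_ excludes n_steps ≤ 0: at n_steps = 0 B's floor division raises ZeroDivisionError,
-- and for negative n_steps the requested chunk size is meaningless (A's size-1 chunks
-- there are an accident of its counter comparison, B naturally yields no chunks).
def Pre_make_target (text : String) (n_seq : Int) (n_steps : Int) : Prop := 1 ≤ n_steps
instance (text : String) (n_seq : Int) (n_steps : Int) : Decidable (Pre_make_target text n_seq n_steps) := by unfold Pre_make_target; infer_instance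

def pvWitness_make_target : String × Int × Int := ("abcde", 2, 2)

-- For n_seq ≤ 0 with a text holding at least one full chunk (1 ≤ n_steps ≤ len(text)),
-- A returns one chunk because it appends before testing n_seq, while B returns [],
-- the intended result of requesting a non-positive number of sequences.
def D_make_target (text : String) (n_seq : Int) (n_steps : Int) : Prop :=
  n_seq ≤ 0 ∧ 1 ≤ n_steps ∧ n_steps ≤ (text.toList.length : Int)
instance (text : String) (n_seq : Int) (n_steps : Int) : Decidable (D_make_target text n_seq n_steps) := by unfold D_make_target; infer_instance

def Spec_make_target (text : String) (n_seq : Int) (n_steps : Int) (out : List (List Int)) : Prop := ¬ D_make_target text n_seq n_steps → out = make_target_alt text n_seq n_steps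
instance (text : String) (n_seq : Int) (n_steps : Int) (out : List (List Int)) : Decidable (Spec_make_target text n_seq n_steps out) := by unfold Spec_make_target; infer_instance

def pvDiffWitness_make_target : String × Int × Int := ("ab", 0, 1)
def pvDiffWitnessOut_make_target : (List (List Int)) × (List (List Int)) := ([[97]], [])

-- ===== CLAIM (what is proved, stated in full; the proofs are below) =====
def Claim_unchanged_make_target : Prop := ∀ (text : String) (n_seq : Int) (n_steps : Int), Dom_make_target text n_seq n_steps → Pre_make_target text n_seq n_steps → Spec_make_target text n_seq n_steps (make_target text n_seq n_steps)
def Claim_changed_make_target : Prop := Dom_make_target (pvDiffWitness_make_target.1) (pvDiffWitness_make_target.2.1) (pvDiffWitness_make_target.2.2) ∧ Pre_make_target (pvDiffWitness_make_target.1) (pvDiffWitness_make_target.2.1) (pvDiffWitness_make_target.2.2) ∧ D_make_target (pvDiffWitness_make_target.1) (pvDiffWitness_make_target.2.1) (pvDiffWitness_make_target.2.2) ∧ make_target (pvDiffWitness_make_target.1) (pvDiffWitness_make_target.2.1) (pvDiffWitness_make_target.2.2) = pvDiffWitnessOut_make_target.1 ∧ make_target_alt (pvDiffWitness_make_target.1)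 (pvDiffWitness_make_target.2.1) (pvDiffWitness_make_target.2.2) = pvDiffWitnessOut_make_target.2 ∧ pvDiffWitnessOut_make_target.1 ≠ pvDiffWitnessOut_make_target.2
def Claim_exact_make_target : Prop := ∀ (text : String) (n_seq : Int) (n_steps : Int), Dom_make_target text n_seq n_steps → Pre_make_target text n_seq n_steps → D_make_target text n_seq n_steps → make_target text n_seq n_steps ≠ make_target_alt text n_seq n_steps

-- ===== LEMMAS AND PROOFS =====

-- Common normal form: the first `count` chunks of size `k` of `codes`.
def chunksN (codes : List Int) (k : Nat) (count : Nat) : List (List Int) :=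
  (List.range count).map (fun i => (codes.drop (i * k)).take k)

lemma chunksN_cons (codes : List Int) (k b : Nat) (hk : 1 ≤ k)
    (hlen : k ≤ codes.length) (hb : 1 ≤ b) :
    chunksN codes k (min b (codes.length / k)) =
      codes.take k :: chunksN (codes.drop k) k (min (b - 1) ((codes.drop k).length / k)) := by
  have hdiv : codes.length / k = (codes.length - k) / k + 1 :=
    Nat.div_eq_sub_div hk hlen
  have hlen' : (codes.drop k).length = codes.length - k := by simp
  have hcnt : min b (codes.length / k) = min (b - 1) ((codes.drop k).length / k) + 1 := by
    rw [hlen', hdiv]; omega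
  rw [hcnt]
  unfold chunksN
  rw [List.range_succ_eq_map]
  simp only [List.map_cons, List.map_map]
  congr 1
  · simp
  · apply List.map_congr_left
    intro i _
    simp only [Function.comp_apply, Nat.succ_eq_add_one, List.drop_drop]
    congr 2
    ring

-- One-chunk consumption: running A's loop from a partially filled `inner` (with
-- nsteps = inner.length, as A maintains) either exhausts the text or completes one chunk.
lemma chunk_step (n_seq n_steps : Int) (k : Nat)
    (hk : (k : Int) = n_steps) :
    ∀ (cs : List Char) (inner : List Int) (arr : List (List Int)),
      inner.length < k →
      make_target_loop n_seq n_steps cs arr inner (inner.length : Int) =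
        if cs.length + inner.length < k then arr
        else
          let arr' := arr ++ [inner ++ ((cs.take (k - inner.length)).map (fun c => (c.toNat : Int)))]
          if n_seq ≤ (arr.length : Int) + 1 then arr'
          else make_target_loop n_seq n_steps (cs.drop (k - inner.length)) arr' [] 0 := by
  intro cs
  induction cs with
  | nil =>
    intro inner arr hinner
    simp [make_target_loop]
    omega
  | cons c cs ih =>
    intro inner arr hinner
    by_cases h1 : inner.length + 1 = k
    · -- the chunk completes on this character
      have hcond : n_steps ≤ (inner.length : Int) + 1 := by omega
      have hge : ¬ (cs.length + 1 + inner.length < k) := by omega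
      have htake : k - inner.length = 1 := by omega
      by_cases h2 : n_seq ≤ ((arr.length : Int) + 1)
      · simp [make_target_loop, hcond, h2, htake, hge]
      · simp [make_target_loop, hcond, h2, htake, hge]
    · -- inner still shorter than k: recurse with inner ++ [ord c]
      have hcond : ¬ (n_steps ≤ (inner.length : Int) + 1) := by omega
      have := ih (inner ++ [(c.toNat : Int)]) arr (by simp; omega)
      simp only [List.length_append, List.length_singleton] at this
      push_cast at this
      rw [show make_target_loop n_seq n_steps (c :: cs) arr inner (inner.length : Int) =
            make_target_loop n_seq n_steps cs arr (inner ++ [(c.toNat : Int)])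
              ((inner.length : Int) + 1) from by simp [make_target_loop, hcond]]
      rw [this]
      have hsub : k - inner.length = (k - (inner.length + 1)) + 1 := by omega
      by_cases h3 : cs.length + (inner.length + 1) < k
      · rw [if_pos h3, if_pos (show (c :: cs).length + inner.length < k by
          simp only [List.length_cons]; omega)]
      · rw [if_neg h3, if_neg (show ¬ ((c :: cs).length + inner.length < k) by
          simp only [List.length_cons]; omega)]
        rw [hsub]
        simp [List.take_succ_cons, List.drop_succ_cons, List.append_assoc]

-- Full loop from a fresh inner buffer equals the appended normal form (case n_seq ≥ 1).
lemma loop_eq_chunksN (n_seq n_steps : Int) (k m : Nat)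
    (hk : (k : Int) = n_steps) (hk1 : 1 ≤ k) (hm : (m : Int) = n_seq) :
    ∀ (n : Nat) (cs : List Char), cs.length ≤ n → ∀ (arr : List (List Int)),
      arr.length < m →
      make_target_loop n_seq n_steps cs arr [] 0 =
        arr ++ chunksN (cs.map (fun c => (c.toNat : Int))) k
                 (min (m - arr.length) (cs.length / k)) := by
  intro n
  induction n with
  | zero =>
    intro cs hcs arr harr
    have : cs = [] := List.length_eq_zero_iff.mp (by omega)
    subst this
    simp [make_target_loop, chunksN]
  | succ n ih =>
  intro cs hcs arr harr
  have hstep := chunk_step n_seq n_steps k hk cs [] arr (by simp; omega)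
  simp only [List.length_nil, Nat.sub_zero, List.nil_append, Nat.add_zero,
    Nat.cast_zero] at hstep
  rw [hstep]
  by_cases hshort : cs.length < k
  · have : cs.length / k = 0 := Nat.div_eq_of_lt hshort
    simp [hshort, this, chunksN]
  · have hlen : k ≤ cs.length := by omega
    have hcons := chunksN_cons (cs.map (fun c => (c.toNat : Int))) k (m - arr.length)
      hk1 (by simpa using hlen) (by omega)
    simp only [List.length_map] at hcons
    by_cases hbreak : n_seq ≤ (arr.length : Int) + 1
    · have hb1 : m - arr.length = 1 := by omega
      rw [hb1] at hcons
      have hz : min (1 - 1) ((((cs.map fun c => (c.toNat : Int)).drop k)).length / k) = 0 := by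
        simp
      rw [hz] at hcons
      simp only [hshort, if_false, if_pos hbreak, hb1, hcons]
      simp [chunksN, List.map_take]
    · have hrec := ih (cs.drop k) (by simp; omega)
        (arr ++ [[] ++ ((cs.take k).map (fun c => (c.toNat : Int)))]) (by simp; omega)
      simp only [List.nil_append, List.length_append, List.length_singleton] at hrec
      rw [if_neg hshort, if_neg hbreak, hrec, hcons]
      simp only [List.map_take, List.map_drop, List.length_drop, List.length_map,
        List.append_assoc, List.singleton_append]
      have hx : m - (arr.length + 1) = m - arr.length - 1 := by omega
      rw [hx]

lemma alt_eq_chunksN (text : String) (n_seq n_steps : Int) (k m : Nat)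
    (hk : (k : Int) = n_steps) (hm : (m : Int) = n_seq) :
    make_target_alt text n_seq n_steps =
      chunksN (text.toList.map (fun c => (c.toNat : Int))) k
        (min m (text.toList.length / k)) := by
  unfold make_target_alt chunksN
  dsimp only
  have hfd : PySem.Int.floordiv ((text.toList.map (fun c => (c.toNat : Int))).length : Int)
      n_steps = ((text.toList.length / k : Nat) : Int) := by
    rw [← hk]
    simp only [List.length_map]
    exact_mod_cast PySem.Int.floordiv_natCast text.toList.length k
  rw [hfd, ← hm]
  have hmin : min (m : Int) ((text.toList.length / k : Nat) : Int)
      = ((min m (text.toList.length / k) : Nat) : Int) := by push_cast; ring_nf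
  rw [hmin, PySem.List.pyRange_zero_nat]
  rw [List.map_map]
  apply List.map_congr_left
  intro i _
  simp only [Function.comp_apply]
  rw [← hk]
  have h1 : ((i : Int) * (k : Int)) = ((i * k : Nat) : Int) := by push_cast; ring
  have h2 : (((i : Int) + 1) * (k : Int)) = ((i * k : Nat) : Int) + ((k : Nat) : Int) := by
    push_cast; ring
  rw [h1, h2, PySem.List.slice_natCast_add]

-- When n_seq ≤ 0, B's count is nonpositive, so B returns [].
lemma alt_eq_nil_of_nonpos (text : String) (n_seq n_steps : Int) (h : n_seq ≤ 0) :
    make_target_alt text n_seq n_steps = [] := by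
  unfold make_target_alt
  dsimp only
  rw [PySem.List.pyRange_one_eq_nil (by omega)]
  simp

-- ===== VERDICT (by name: the statement is the Claim_ definition above) =====
theorem make_target_spec : Claim_unchanged_make_target := by
  intro text n_seq n_steps _ hpre hnd
  unfold make_target
  set k : Nat := n_steps.toNat with hkdef
  have hpre' : (1 : Int) ≤ n_steps := hpre
  have hk : (k : Int) = n_steps := by rw [hkdef]; omega
  have hk1 : 1 ≤ k := by omega
  by_cases hq : 1 ≤ n_seq
  · set m : Nat := n_seq.toNat with hmdef
    have hm : (m : Int) = n_seq := by rw [hmdef]; omega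
    have hm1 : 0 < m := by omega
    rw [loop_eq_chunksN n_seq n_steps k m hk hk1 hm text.toList.length text.toList le_rfl []
        (by simpa using hm1),
      alt_eq_chunksN text n_seq n_steps k m hk hm]
    simp
  · -- n_seq ≤ 0 and (by ¬D_) text shorter than one chunk: both sides are []
    have hns : n_seq ≤ 0 := by omega
    have hshort : (text.toList.length : Int) < n_steps := by
      unfold D_make_target at hnd
      by_contra hc
      exact hnd ⟨hns, hpre', by omega⟩
    have hstep := chunk_step n_seq n_steps k hk text.toList [] [] (by simp only [List.length_nil]; omega)
    simp only [List.length_nil, Nat.sub_zero, List.nil_append, Nat.add_zero,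
      Nat.cast_zero] at hstep
    rw [hstep, if_pos (by have := text.length_toList; omega), alt_eq_nil_of_nonpos text n_seq n_steps hns]

theorem make_target_changed : Claim_changed_make_target := by
  unfold Claim_changed_make_target; decide

theorem make_target_tight : Claim_exact_make_target := by
  intro text n_seq n_steps _ hpre hd
  obtain ⟨hns, hk1, hlen⟩ := hd
  set k : Nat := n_steps.toNat with hkdef
  have hk : (k : Int) = n_steps := by rw [hkdef]; omega
  have hk1' : 1 ≤ k := by omega
  unfold make_target
  have hstep := chunk_step n_seq n_steps k hk text.toList [] [] (by simp only [List.length_nil]; omega)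
  simp only [List.length_nil, Nat.sub_zero, List.nil_append, Nat.add_zero,
    Nat.cast_zero] at hstep
  rw [hstep, if_neg (by have := text.length_toList; omega), if_pos (by omega),
    alt_eq_nil_of_nonpos text n_seq n_steps hns]
  simp
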